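-- pv_equiv track=rewrite | github.com/JoeySoprano420/-The-XYZ-Programming-Language | xyzc.py | list_add
-- ===== SOURCE A (Python) =====
-- def list_add(a,b):
--     if not isinstance(a, list) or not isinstance(b, list): raise Exception("list_add requires lists")
--     n = max(len(a), len(b))
--     out = []
--     for i in range(n):
--         va = a[i] if i < len(a) else 0
--         vb = b[i] if i < len(b) else 0
--         out.append(va + vb)
--     return out
-- ===== SOURCE B (Python) =====
-- def list_add(a, b):
--     if not isinstance(a, list) or not isinstance(b, list): raise Exception("list_add requires lists")
--     long_, short = (b, a) if len(a) < len(b) else (a, b)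
--     out = [x + y for x, y in zip(long_, short)]
--     out += long_[len(short):]
--     return out
-- ===== Notes on version B (the rewrite author's own statement) =====
-- stated objective: idiomatic
-- what changed: Replaces the index loop with max-length and per-element bounds tests by a zip of the two lists (longer first) plus the longer list's unmatched tail, removing all index arithmetic.
import Mathlib
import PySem

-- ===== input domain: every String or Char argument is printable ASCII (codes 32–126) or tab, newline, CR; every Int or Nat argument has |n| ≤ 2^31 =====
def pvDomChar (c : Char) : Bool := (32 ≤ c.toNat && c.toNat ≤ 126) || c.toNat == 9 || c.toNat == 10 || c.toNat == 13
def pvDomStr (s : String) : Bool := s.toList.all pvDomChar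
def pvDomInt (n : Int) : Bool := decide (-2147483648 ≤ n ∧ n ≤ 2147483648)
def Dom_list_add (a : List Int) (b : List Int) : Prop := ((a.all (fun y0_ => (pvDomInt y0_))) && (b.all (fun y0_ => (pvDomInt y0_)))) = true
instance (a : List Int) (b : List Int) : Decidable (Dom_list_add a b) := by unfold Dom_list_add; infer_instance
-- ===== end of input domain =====

-- B replaces A's index loop (max-length, per-index bounds tests) by a zip of the two
-- lists (longer first) plus the longer list's unmatched tail; idiomatic, same cost.


-- ===== PORT A =====
-- for i in range(n): out.append((a[i] if i < len(a) else 0) + (b[i] if i < len(b) else 0))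
def list_add (a : List Int) (b : List Int) : List Int :=
  let n : Int := max (a.length : Int) (b.length : Int)
  (PySem.List.pyRange 0 n 1).foldl
    (fun out i =>
      out ++ [(if i < (a.length : Int) then PySem.List.pyGetD a i 0 else 0) +
              (if i < (b.length : Int) then PySem.List.pyGetD b i 0 else 0)]) []

-- ===== PORT B =====
-- out = [x + y for x, y in zip(long_, short)]; out += long_[len(short):]
def pvCore (long short : List Int) : List Int :=
  ((long.zip short).map (fun p => p.1 + p.2)) ++
    PySem.List.slice long (some (short.length : Int)) none

def list_add_alt (a : List Int) (b : List Int) : List Int :=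
  if a.length < b.length then pvCore b a else pvCore a b

-- ===== PRECONDITION & SPEC =====
def Spec_list_add (a : List Int) (b : List Int) (out : List Int) : Prop := out = list_add_alt a b
instance (a : List Int) (b : List Int) (out : List Int) : Decidable (Spec_list_add a b out) := by unfold Spec_list_add; infer_instance

-- ===== CLAIM (what is proved, stated in full; the proofs are below) =====
def Claim_equal_list_add : Prop := ∀ (a : List Int) (b : List Int), Dom_list_add a b → Spec_list_add a b (list_add a b)

-- ===== LEMMAS AND PROOFS =====

-- proof-only reference function: point-wise sum with zero padding
def pvPad : List Int → List Int → List Int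
  | x :: xs, y :: ys => (x + y) :: pvPad xs ys
  | x :: xs, []      => (x + 0) :: pvPad xs []
  | [],      y :: ys => (0 + y) :: pvPad [] ys
  | [],      []      => []

lemma pvPad_comm : ∀ (a b : List Int), pvPad a b = pvPad b a
  | x :: xs, y :: ys => by simp [pvPad, pvPad_comm xs ys, Int.add_comm]
  | x :: xs, []      => by simp [pvPad, pvPad_comm xs []]
  | [],      y :: ys => by simp [pvPad, pvPad_comm [] ys]
  | [],      []      => rfl

lemma core_drop (long short : List Int) :
    pvCore long short =
      ((long.zip short).map (fun p => p.1 + p.2)) ++ long.drop short.length := by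
  rw [pvCore, PySem.List.slice_from long (a := (short.length : Int)) (Int.natCast_nonneg _)]
  simp

-- list_add_alt only calls pvCore with the longer list first
lemma core_eq_pad : ∀ (long short : List Int), short.length ≤ long.length →
    pvCore long short = pvPad long short
  | x :: xs, y :: ys, h => by
      rw [core_drop, pvPad, ← core_eq_pad xs ys (by simpa using h), core_drop]
      simp
  | x :: xs, [], h => by
      rw [core_drop, pvPad, ← core_eq_pad xs [] (by simp), core_drop]
      simp
  | [], short, h => by
      have : short = [] := by simpa using h
      subst this
      simp [core_drop, pvPad]

lemma pad_getElem? (a b : List Int) (k : Nat) (hk : k < max a.length b.length) :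
    (pvPad a b)[k]? = some ((a.getD k 0) + (b.getD k 0)) := by
  induction a generalizing b k with
  | nil =>
    induction b generalizing k with
    | nil => simp at hk
    | cons y ys ih =>
      cases k with
      | zero => simp [pvPad]
      | succ m => simpa [pvPad] using ih m (by simpa using hk)
  | cons x xs ih =>
    cases b with
    | nil =>
      cases k with
      | zero => simp [pvPad]
      | succ m =>
        have := ih [] m (by simp only [List.length_cons] at hk; omega)
        simpa [pvPad] using this
    | cons y ys =>
      cases k with
      | zero => simp [pvPad]
      | succ m =>
        have := ih (ys) m (by simp only [List.length_cons] at hk; omega)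
        simpa [pvPad] using this

lemma pad_length : ∀ (a b : List Int), (pvPad a b).length = max a.length b.length
  | x :: xs, y :: ys => by simp [pvPad, pad_length xs ys]
  | x :: xs, []      => by simp [pvPad, pad_length xs []]
  | [],      y :: ys => by simp [pvPad, pad_length [] ys]
  | [],      []      => by simp [pvPad]

lemma A_eq_pad (a b : List Int) : list_add a b = pvPad a b := by
  have hmap : list_add a b =
      (PySem.List.pyRange 0 (max (a.length : Int) (b.length : Int)) 1).map
        (fun i => (if i < (a.length : Int) then PySem.List.pyGetD a i 0 else 0) +
                  (if i < (b.length : Int) then PySem.List.pyGetD b i 0 else 0)) := by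
    unfold list_add
    simp only [PySem.List.foldl_append_singleton_eq_map, List.nil_append]
  set n : Int := max (a.length : Int) (b.length : Int) with hn
  rw [hmap, PySem.List.pyRange_one 0 n, List.map_map]
  apply List.ext_getElem?
  intro k
  by_cases hk : k < (n - 0).toNat
  · have hkm : k < max a.length b.length := by simp [hn] at hk ⊢; omega
    rw [pad_getElem? a b k hkm]
    rw [List.getElem?_map, List.getElem?_range hk]
    simp only [Option.map_some, Function.comp_apply, zero_add]
    have ga : PySem.List.pyGetD a ((k : Nat) : Int) 0 = a.getD k 0 :=
      PySem.List.pyGetD_natCast a k 0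
    have gb : PySem.List.pyGetD b ((k : Nat) : Int) 0 = b.getD k 0 :=
      PySem.List.pyGetD_natCast b k 0
    by_cases ha : k < a.length <;> by_cases hb : k < b.length <;>
      simp [ga, gb, ha, hb, List.getD_eq_getElem?_getD]
  · have h2 : (pvPad a b)[k]? = none := by
      rw [List.getElem?_eq_none]
      rw [pad_length]
      simp [hn] at hk ⊢; omega
    rw [h2, List.getElem?_map]
    simp
    omega

-- ===== VERDICT (by name: the statement is the Claim_ definition above) =====
theorem list_add_spec : Claim_equal_list_add := by
  intro a b _
  unfold Spec_list_add list_add_alt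
  rw [A_eq_pad]
  by_cases h : a.length < b.length
  · rw [if_pos h, core_eq_pad b a (by omega), pvPad_comm a b]
  · rw [if_neg h, core_eq_pad a b (by omega)]
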